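-- pv_equiv track=rewrite | github.com/nanohana-team/Local-Small-Language-Model | src/core/relation/index.py | _build_surface_first_char
-- ===== SOURCE A (Python) =====
-- from typing import Any, Dict, Iterable, List, Mapping
--
-- def _append_unique(mapping: Dict[str, List[str]], key: str | None, value: str) -> None:
--     if not key:
--         return
--     bucket = mapping.setdefault(str(key), [])
--     if value not in bucket:
--         bucket.append(value)
--
-- def _build_surface_first_char(surface_to_entries: Mapping[str, List[str]]) -> Dict[str, List[str]]:
--     first_char_map: Dict[str, List[str]] = {}
--     for surface in surface_to_entries.keys():
--         if not surface:
--             continue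
--         _append_unique(first_char_map, surface[0], surface)
--     for bucket in first_char_map.values():
--         bucket.sort(key=len, reverse=True)
--     return first_char_map
-- ===== SOURCE B (Python) =====
-- def _build_surface_first_char(surface_to_entries):
--     # One global stable sort instead of per-bucket sorts: buckets are filled
--     # already in length-descending order from the globally sorted key list.
--     nonempty = [s for s in surface_to_entries.keys() if s]
--     result = {s[0]: [] for s in nonempty}
--     for s in sorted(nonempty, key=len, reverse=True):
--         result[s[0]].append(s)
--     return result
-- ===== Notes on version B (the rewrite author's own statement) =====
-- stated objective: faster
-- what changed: B replaces A's per-key bucket-membership dedup scan and per-bucket sorts by one global stable sort of the non-empty keys followed by a single grouping pass that appends into pre-created buckets, so no inner scan or per-bucket sort remains.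
import Mathlib
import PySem

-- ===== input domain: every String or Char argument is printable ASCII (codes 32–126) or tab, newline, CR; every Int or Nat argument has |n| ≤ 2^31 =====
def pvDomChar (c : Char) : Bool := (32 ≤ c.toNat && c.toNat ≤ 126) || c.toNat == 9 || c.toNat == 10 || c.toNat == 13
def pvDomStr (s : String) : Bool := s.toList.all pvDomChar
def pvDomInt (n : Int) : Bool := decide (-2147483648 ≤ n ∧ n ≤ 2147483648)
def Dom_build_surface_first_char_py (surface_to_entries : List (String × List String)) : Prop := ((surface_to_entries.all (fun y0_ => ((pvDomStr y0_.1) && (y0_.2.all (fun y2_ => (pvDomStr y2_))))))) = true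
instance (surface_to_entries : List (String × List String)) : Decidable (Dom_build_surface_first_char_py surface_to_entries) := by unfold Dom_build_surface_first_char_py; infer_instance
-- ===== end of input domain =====

-- B replaces A's per-key bucket-membership scan and per-bucket sorts by one global stable
-- sort of the non-empty keys plus a single grouping pass (objective: faster).


-- ===== PORT A =====
-- _append_unique (key is always surface[0] here, a one-char string, so `if not key` tests emptiness)
def pvAppendUnique (mapping : PySem.Dict String (List String)) (key : String) (value : String) :
    PySem.Dict String (List String) :=
  if key.toList.isEmpty then mapping
  else
    let bucketMap := mapping.setdefault key []
    let bucket := bucketMap.getD key []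
    if value ∈ bucket then bucketMap else bucketMap.insert key (bucket ++ [value])

def build_surface_first_char_py (surface_to_entries : List (String × List String)) :
    List (String × List String) :=
  let fcm := (PySem.Dict.ofList surface_to_entries).keys.foldl
    (fun m surface =>
      if surface.toList.isEmpty then m  -- `if not surface: continue`
      else pvAppendUnique m (String.ofList (surface.toList.take 1)) surface)  -- surface[0]
    PySem.Dict.empty
  -- `for bucket in first_char_map.values(): bucket.sort(key=len, reverse=True)` then return
  (fcm.items.map (fun p => (p.1, PySem.List.sorted p.2 PySem.Str.len true)))

-- ===== PORT B =====
def pvFirstChar (s : String) : String := String.ofList (s.toList.take 1)  -- s[0] for non-empty s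

def build_surface_first_char_py_alt (surface_to_entries : List (String × List String)) :
    List (String × List String) :=
  let nonempty := (PySem.Dict.ofList surface_to_entries).keys.filter (fun s => !s.toList.isEmpty)
  let result := nonempty.foldl (fun d s => d.insert (pvFirstChar s) []) PySem.Dict.empty
  let result := (PySem.List.sorted nonempty PySem.Str.len true).foldl
    (fun d s => d.modify (pvFirstChar s) [] (fun b => b ++ [s])) result  -- result[s[0]].append(s)
  result.items

-- ===== PRECONDITION & SPEC =====
def Spec_build_surface_first_char_py (surface_to_entries : List (String × List String)) (out : List (String × List String)) : Prop := out = build_surface_first_char_py_alt surface_to_entries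
instance (surface_to_entries : List (String × List String)) (out : List (String × List String)) : Decidable (Spec_build_surface_first_char_py surface_to_entries out) := by unfold Spec_build_surface_first_char_py; infer_instance

-- ===== CLAIM (what is proved, stated in full; the proofs are below) =====
def Claim_equal_build_surface_first_char_py : Prop := ∀ (surface_to_entries : List (String × List String)), Dom_build_surface_first_char_py surface_to_entries → Spec_build_surface_first_char_py surface_to_entries (build_surface_first_char_py surface_to_entries)

-- ===== LEMMAS AND PROOFS =====

-- insertBy with the reverse comparison keeps a key-descending list key-descending
theorem pv_insertBy_pairwise {α κ : Type} [LinearOrder κ] (key : α → κ) (x : α) (l : List α)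
    (h : l.Pairwise (fun a b => key b ≤ key a)) :
    (PySem.List.insertBy (fun a b => decide (key b < key a)) x l).Pairwise
      (fun a b => key b ≤ key a) := by
  induction l with
  | nil => simp [PySem.List.insertBy]
  | cons y ys ih =>
    rw [List.pairwise_cons] at h
    obtain ⟨hy, hys⟩ := h
    by_cases hxy : key y < key x
    · simp only [PySem.List.insertBy, hxy, decide_true, if_pos]
      refine List.Pairwise.cons ?_ (List.Pairwise.cons hy hys)
      intro b hb
      rcases List.mem_cons.mp hb with rfl | hb
      · exact le_of_lt hxy
      · exact le_trans (hy _ hb) (le_of_lt hxy)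
    · simp only [PySem.List.insertBy, hxy, decide_false, Bool.false_eq_true, if_false]
      refine List.Pairwise.cons ?_ (ih hys)
      intro b hb
      rw [PySem.List.mem_insertBy] at hb
      rcases hb with rfl | hb
      · exact not_lt.mp hxy
      · exact hy _ hb

-- inserting before a list whose every element compares below goes to the front
theorem pv_insertBy_all {α : Type} (bef : α → α → Bool) (x : α) (l : List α)
    (h : ∀ z ∈ l, bef x z = true) :
    PySem.List.insertBy bef x l = x :: l := by
  cases l with
  | nil => rfl
  | cons y ys => simp [PySem.List.insertBy, h y (by simp)]

-- filtering commutes with one insertion step into a key-descending list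
theorem pv_filter_insertBy {α κ : Type} [LinearOrder κ] (key : α → κ) (p : α → Bool) (x : α)
    (l : List α) (h : l.Pairwise (fun a b => key b ≤ key a)) :
    (PySem.List.insertBy (fun a b => decide (key b < key a)) x l).filter p =
      if p x then PySem.List.insertBy (fun a b => decide (key b < key a)) x (l.filter p)
      else l.filter p := by
  induction l with
  | nil => cases hpx : p x <;> simp [PySem.List.insertBy, List.filter, hpx]
  | cons y ys ih =>
    rw [List.pairwise_cons] at h
    obtain ⟨hy, hys⟩ := h
    by_cases hxy : key y < key x
    · simp only [PySem.List.insertBy, hxy, decide_true, if_pos]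
      cases hpx : p x <;> cases hpy : p y <;>
        simp only [List.filter, hpx, hpy, Bool.false_eq_true, ↓reduceIte]
      · rw [pv_insertBy_all]
        intro z hz
        rw [List.mem_filter] at hz
        simp [lt_of_le_of_lt (hy _ hz.1) hxy]
      · simp [PySem.List.insertBy, hxy]
    · simp only [PySem.List.insertBy, hxy, decide_false, Bool.false_eq_true, if_false]
      cases hpx : p x <;> cases hpy : p y <;>
        simp only [List.filter, hpx, hpy, ih hys, Bool.false_eq_true,
          ↓reduceIte]
      · simp [PySem.List.insertBy, hxy]

theorem pv_filter_foldl_insertBy {α κ : Type} [LinearOrder κ] (key : α → κ) (p : α → Bool)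
    (xs : List α) (acc : List α) (h : acc.Pairwise (fun a b => key b ≤ key a)) :
    (xs.foldl (fun acc x => PySem.List.insertBy (fun a b => decide (key b < key a)) x acc) acc).filter p
      = (xs.filter p).foldl
          (fun acc x => PySem.List.insertBy (fun a b => decide (key b < key a)) x acc)
          (acc.filter p) := by
  induction xs generalizing acc with
  | nil => rfl
  | cons x xs ih =>
    simp only [List.foldl_cons, List.filter]
    cases hpx : p x
    · rw [ih _ (pv_insertBy_pairwise key x acc h), pv_filter_insertBy key p x acc h, hpx]
      simp
    · rw [ih _ (pv_insertBy_pairwise key x acc h), pv_filter_insertBy key p x acc h, hpx]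
      simp

-- CORE: a stable descending sort commutes with filtering
theorem pv_filter_sorted {α κ : Type} [LinearOrder κ] (key : α → κ) (p : α → Bool)
    (xs : List α) :
    (PySem.List.sorted xs key true).filter p = PySem.List.sorted (xs.filter p) key true := by
  rw [PySem.List.sorted_rev_eq_foldl_insertBy, PySem.List.sorted_rev_eq_foldl_insertBy]
  simpa using pv_filter_foldl_insertBy key p xs [] (by simp)

-- one _append_unique call whose value is not yet in the target bucket is a modify
theorem pv_appendUnique_eq_modify (d : PySem.Dict String (List String)) (k v : String)
    (hk : k.toList ≠ []) (hv : v ∉ d.getD k []) :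
    pvAppendUnique d k v = d.modify k [] (fun b => b ++ [v]) := by
  unfold pvAppendUnique
  rw [if_neg (by simpa using hk)]
  by_cases hc : d.contains k = true
  · rw [PySem.Dict.setdefault_of_contains _ _ hc, if_neg (by simpa using hv)]
    rfl
  · rw [PySem.Dict.setdefault_of_not_contains _ _ (by simpa using hc)]
    dsimp only
    rw [PySem.Dict.getD_insert_self, if_neg (List.not_mem_nil), List.nil_append,
      PySem.Dict.insert_insert_self, PySem.Dict.modify,
      PySem.Dict.getD_of_not_contains _ _ (by simpa using hc), List.nil_append]

-- A's grouping loop over distinct, not-yet-bucketed surfaces is a plain modify fold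
theorem pv_foldA_eq_modify (l : List String) (hnd : l.Nodup)
    (hne : ∀ s ∈ l, s.toList ≠ [])
    (d : PySem.Dict String (List String)) (hd : ∀ s ∈ l, ∀ c, s ∉ d.getD c []) :
    l.foldl (fun m s => pvAppendUnique m (pvFirstChar s) s) d
      = l.foldl (fun m s => m.modify (pvFirstChar s) [] (fun b => b ++ [s])) d := by
  induction l generalizing d with
  | nil => rfl
  | cons s t ih =>
    have hs : s.toList ≠ [] := hne s (by simp)
    have hfc : (pvFirstChar s).toList ≠ [] := by
      cases h : s.toList with
      | nil => exact absurd h hs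
      | cons c cs => simp [pvFirstChar, h]
    simp only [List.foldl_cons]
    rw [pv_appendUnique_eq_modify d (pvFirstChar s) s hfc (hd s (by simp) _)]
    refine ih (List.nodup_cons.mp hnd).2 (fun u hu => hne u (by simp [hu])) _ ?_
    intro u hu c
    rw [PySem.Dict.getD_modify]
    split_ifs with hcf
    · intro hmem
      rcases List.mem_append.mp hmem with hmem | hmem
      · exact hd u (by simp [hu]) _ hmem
      · have : u = s := by simpa using hmem
        exact (List.nodup_cons.mp hnd).1 (this ▸ hu)
    · exact hd u (by simp [hu]) c

-- each bucket of the modify fold is the filter of the processed list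
theorem pv_getD_foldmod (l : List String) (d : PySem.Dict String (List String)) (c : String) :
    (l.foldl (fun m s => m.modify (pvFirstChar s) [] (fun b => b ++ [s])) d).getD c []
      = d.getD c [] ++ l.filter (fun s => pvFirstChar s == c) := by
  have h := PySem.Dict.getD_foldl_modify_append (l.map (fun s => (pvFirstChar s, s))) d c
  rw [List.foldl_map] at h
  simpa [List.filter_map, Function.comp_def] using h

-- every bucket created by B's first pass is empty
theorem pv_getD_foldins (l : List String) (d : PySem.Dict String (List String))
    (h : ∀ c, d.getD c [] = ([] : List String)) (c : String) :
    (l.foldl (fun d s => d.insert (pvFirstChar s) []) d).getD c [] = [] := by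
  induction l generalizing d with
  | nil => exact h c
  | cons s t ih =>
    simp only [List.foldl_cons]
    refine ih _ ?_
    intro c'
    rw [PySem.Dict.getD_insert]
    split_ifs with hc
    · rfl
    · exact h c'

-- updating a set with elements it already has changes nothing
theorem pv_update_of_subset (s : List String) (xs : List String) (h : ∀ x ∈ xs, x ∈ s) :
    PySem.Set.update s xs = s := by
  rw [PySem.Set.update_eq_append_filter]
  have : (PySem.Set.ofList xs).filter (fun y => !(PySem.Set.contains s y)) = [] := by
    rw [List.filter_eq_nil_iff]
    intro y hy
    have hys : y ∈ s := h y ((PySem.Set.mem_ofList _ _).mp hy)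
    simpa using hys
  rw [this, List.append_nil]

-- ===== VERDICT (by name: the statement is the Claim_ definition above) =====
theorem build_surface_first_char_py_spec : Claim_equal_build_surface_first_char_py := by
  intro s2e _
  unfold Spec_build_surface_first_char_py build_surface_first_char_py build_surface_first_char_py_alt
  dsimp only []
  set K := (PySem.Dict.ofList s2e).keys with hKdef
  have hK : K.Nodup := PySem.Dict.nodup_keys_ofList s2e
  set L := K.filter (fun s => !s.toList.isEmpty) with hLdef
  have hL : L.Nodup := hK.filter _
  have hLne : ∀ s ∈ L, s.toList ≠ [] := by
    intro s hs
    have := (List.mem_filter.mp hs).2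
    simpa using this
  -- A's first loop over K equals the appendUnique fold over L
  have hKfold : K.foldl
      (fun m surface => if surface.toList.isEmpty then m
        else pvAppendUnique m (String.ofList (surface.toList.take 1)) surface)
      PySem.Dict.empty
      = L.foldl (fun m s => pvAppendUnique m (pvFirstChar s) s) PySem.Dict.empty := by
    rw [hLdef, List.foldl_filter]
    refine PySem.List.foldl_congr_mem _ _ _ _ ?_
    intro m s _
    by_cases hse : s.toList.isEmpty = true <;> simp [hse, pvFirstChar]
  -- the modify fold it equals
  have hA := pv_foldA_eq_modify L hL hLne PySem.Dict.empty
    (by intro s _ c; simp [PySem.Dict.getD_empty])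
  set dA := L.foldl (fun m s => m.modify (pvFirstChar s) [] (fun b => b ++ [s]))
    PySem.Dict.empty with hdAdef
  have hAkeys : dA.keys = PySem.Set.ofList (L.map pvFirstChar) := by
    rw [hdAdef, PySem.Dict.keys_foldl_modify_key L pvFirstChar [] (fun _ s => (fun b => b ++ [s]))]
    simp [PySem.Dict.keys_empty, PySem.Set.update_nil_left]
  have hAnd : dA.keys.Nodup := by
    rw [hAkeys]; exact PySem.Set.nodup_ofList _
  have hAgetD : ∀ c, dA.getD c [] = L.filter (fun s => pvFirstChar s == c) := by
    intro c
    rw [hdAdef, pv_getD_foldmod, PySem.Dict.getD_empty, List.nil_append]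
  -- B's dict
  set d0 := L.foldl (fun d s => d.insert (pvFirstChar s) []) PySem.Dict.empty with hd0def
  have hd0keys : d0.keys = PySem.Set.ofList (L.map pvFirstChar) := by
    rw [hd0def, PySem.Dict.keys_foldl_insert_key L pvFirstChar (fun _ _ => [])]
    simp [PySem.Dict.keys_empty, PySem.Set.update_nil_left]
  have hd0getD : ∀ c, d0.getD c [] = ([] : List String) := by
    intro c
    rw [hd0def]
    exact pv_getD_foldins L PySem.Dict.empty (fun c => PySem.Dict.getD_empty _ _) c
  set SL := PySem.List.sorted L PySem.Str.len true with hSLdef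
  set dB := SL.foldl (fun d s => d.modify (pvFirstChar s) [] (fun b => b ++ [s])) d0 with hdBdef
  have hBkeys : dB.keys = PySem.Set.ofList (L.map pvFirstChar) := by
    rw [hdBdef, PySem.Dict.keys_foldl_modify_key SL pvFirstChar [] (fun _ s => (fun b => b ++ [s])),
      hd0keys]
    refine pv_update_of_subset _ _ ?_
    intro x hx
    rcases List.mem_map.mp hx with ⟨s, hs, rfl⟩
    rw [PySem.Set.mem_ofList]
    exact List.mem_map_of_mem ((PySem.List.mem_sorted _ _ _ _).mp (hSLdef ▸ hs))
  have hBnd : dB.keys.Nodup := by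
    rw [hBkeys]; exact PySem.Set.nodup_ofList _
  have hBgetD : ∀ c, dB.getD c [] = SL.filter (fun s => pvFirstChar s == c) := by
    intro c
    rw [hdBdef, pv_getD_foldmod, hd0getD, List.nil_append]
  -- items of both sides via keys + getD
  rw [hKfold, hA]
  rw [PySem.Dict.items_eq_map_keys dA hAnd [], PySem.Dict.items_eq_map_keys dB hBnd []]
  rw [hAkeys, hBkeys, List.map_map]
  refine List.map_congr_left ?_
  intro c _
  simp only [Function.comp_def, hAgetD, hBgetD, hSLdef]
  rw [pv_filter_sorted]
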